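-- pv_equiv track=rewrite | github.com/JancisWang/leetcode_python | 1223. 掷骰子模拟.py | dieSimulator
-- ===== SOURCE A (Python) =====
-- from typing import List
--
-- def dieSimulator(n: int, rollMax: List[int]) -> int:
--     dp = [[[0 for i in range(16)] for _ in range(7)] for j in range(n+1)]
--     mod = 10**9 + 7
--
--     for i in range(1, n+1):
--         for j in range(1, 7):
--             if i==1:
--                 dp[i][j][1] = 1
--                 continue
--
--             for k in range(2, rollMax[j-1]+1):
--                 dp[i][j][k] = dp[i-1][j][k-1]
--
--             res = 0
--             for l in range(1, 7):
--                 if l != j: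
--                     for kk in range(1, 16):
--                         res += dp[i-1][l][kk]
--                         res %= mod
--             dp[i][j][1] = res
--     s = 0
--     for j in range(1, 7):
--         for k in range(1, 16):
--             s += dp[n][j][k]
--             s %= mod
--     return s
-- ===== SOURCE B (Python) =====
-- def dieSimulator(n, rollMax):
--     MOD = 10**9 + 7
--     if n <= 0:
--         return 0
--     if n == 1:
--         return 6
--     # new[j][i] = number of valid length-i sequences whose last run (of face j) starts at i
--     new = [[0] * (n + 1) for _ in range(6)]
--     f = [1] * 6          # f[j] = sequences of current length ending with face j
--     for j in range(6):
--         new[j][1] = 1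
--     total = 6
--     for i in range(2, n + 1):
--         prev_total = total
--         total = 0
--         for j in range(6):
--             nr = (prev_total - f[j]) % MOD
--             new[j][i] = nr
--             f[j] = (f[j] + nr) % MOD
--             t = i - rollMax[j]
--             if 1 <= t <= n:
--                 f[j] = (f[j] - new[j][t]) % MOD
--             total = (total + f[j]) % MOD
--     return total
-- ===== Notes on version B (the rewrite author's own statement) =====
-- stated objective: alternative
-- what changed: Replaces the 3-D DP over (length, face, run-length) and its per-cell rescan of all 6x15 previous-layer cells by a 2-D DP dp[i][j] = sequences ending in face j, updated in O(1) per cell with a sliding-window inclusion-exclusion subtraction of the run start that would exceed rollMax[j].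
-- outside the precondition, e.g. on dieSimulator(2, [0, 1, 1, 1, 1, 1]): A returns 30, B returns 26
import Mathlib
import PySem

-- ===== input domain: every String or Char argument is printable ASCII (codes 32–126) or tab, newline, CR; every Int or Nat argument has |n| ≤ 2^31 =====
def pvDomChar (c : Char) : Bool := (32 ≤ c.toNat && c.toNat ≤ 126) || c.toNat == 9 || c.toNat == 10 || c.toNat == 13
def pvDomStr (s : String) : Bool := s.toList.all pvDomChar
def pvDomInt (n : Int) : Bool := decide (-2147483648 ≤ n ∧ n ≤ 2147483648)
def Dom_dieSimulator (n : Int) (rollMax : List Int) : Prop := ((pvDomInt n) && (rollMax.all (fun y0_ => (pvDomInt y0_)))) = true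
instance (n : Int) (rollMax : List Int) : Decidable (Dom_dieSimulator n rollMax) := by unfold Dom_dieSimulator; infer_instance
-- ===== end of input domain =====

-- B replaces A's 3-D DP over (length, face, run-length) and its per-cell rescan of the whole
-- previous 6x15 layer by a 2-D sliding-window DP over (length, face); the RETURN values are
-- proved equal on Pre_ below.

def pvM : Int := 10 ^ 9 + 7

-- ===== PORT A =====
-- dp[i][j][k] read/write; on every access A performs under Pre_ the indices are nonnegative
-- and in range, where getD/set are exact.
def pvGet3 (dp : List (List (List Int))) (i j k : Int) : Int :=
  (((dp.getD i.toNat []).getD j.toNat []).getD k.toNat 0)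

def pvSet3 (dp : List (List (List Int))) (i j k : Int) (v : Int) : List (List (List Int)) :=
  dp.set i.toNat ((dp.getD i.toNat []).set j.toNat
    (((dp.getD i.toNat []).getD j.toNat []).set k.toNat v))

-- the body of A's `for j in range(1, 7)` loop, verbatim
def pvAface (rollMax : List Int) (i : Int) (dp : List (List (List Int))) (j : Int) :
    List (List (List Int)) :=
  if i = 1 then pvSet3 dp i j 1 1
  else
    let dp := (PySem.List.pyRange 2 (rollMax.getD (j-1).toNat 0 + 1) 1).foldl
      (fun dp k => pvSet3 dp i j k (pvGet3 dp (i-1) j (k-1))) dp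
    let res := (PySem.List.pyRange 1 7 1).foldl (fun res l =>
      if l ≠ j then
        (PySem.List.pyRange 1 16 1).foldl
          (fun res kk => PySem.Int.mod (res + pvGet3 dp (i-1) l kk) pvM) res
      else res) 0
    pvSet3 dp i j 1 res

def dieSimulator (n : Int) (rollMax : List Int) : Int :=
  let dp0 : List (List (List Int)) :=
    List.replicate (n+1).toNat (List.replicate 7 (List.replicate 16 (0 : Int)))
  let dp := (PySem.List.pyRange 1 (n+1) 1).foldl
    (fun dp i => (PySem.List.pyRange 1 7 1).foldl (pvAface rollMax i) dp) dp0
  (PySem.List.pyRange 1 7 1).foldl (fun s j =>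
    (PySem.List.pyRange 1 16 1).foldl
      (fun s k => PySem.Int.mod (s + pvGet3 dp n j k) pvM) s) 0

-- ===== PORT B =====
-- the body of B's `for j in range(6)` loop, verbatim; on every access B performs under Pre_
-- the indices are nonnegative and in range, where getD/set are exact.
def pvBface (rollMax : List Int) (n i prev : Int)
    (st : List (List Int) × List Int × Int) (j : ℕ) :
    List (List Int) × List Int × Int :=
  let nw := st.1
  let f := st.2.1
  let total := st.2.2
  let nr := PySem.Int.mod (prev - f.getD j 0) pvM
  let nw := nw.set j ((nw.getD j []).set i.toNat nr)
  let f := f.set j (PySem.Int.mod (f.getD j 0 + nr) pvM)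
  let t := i - rollMax.getD j 0
  let f := if 1 ≤ t ∧ t ≤ n then
      f.set j (PySem.Int.mod (f.getD j 0 - (nw.getD j []).getD t.toNat 0) pvM)
    else f
  (nw, f, PySem.Int.mod (total + f.getD j 0) pvM)

def dieSimulator_alt (n : Int) (rollMax : List Int) : Int :=
  if n ≤ 0 then 0
  else if n = 1 then 6
  else
    let nw0 : List (List Int) := List.replicate 6 (List.replicate (n+1).toNat (0 : Int))
    let f0 : List Int := List.replicate 6 (1 : Int)
    let nw1 := (List.range 6).foldl (fun nw j => nw.set j ((nw.getD j []).set 1 1)) nw0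
    let st := (PySem.List.pyRange 2 (n+1) 1).foldl
      (fun (st : List (List Int) × List Int × Int) i =>
        (List.range 6).foldl (pvBface rollMax n i st.2.2) (st.1, st.2.1, 0))
      (nw1, f0, 6)
    st.2.2

-- ===== PRECONDITION & SPEC =====
-- Pre_ keeps the problem's natural domain: n ≥ 0 and (when n ≥ 2, the only case in which A
-- reads rollMax) at least six rollMax entries, the first six in 1..15.  Excluded inputs on
-- which A still returns: first-six entries ≤ 0 (outside the problem's stated domain
-- 1 ≤ rollMax[i] ≤ 15; A then still counts runs of length 1).  Entries ≥ 16, or n < 0, make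
-- A raise IndexError.
def Pre_dieSimulator (n : Int) (rollMax : List Int) : Prop :=
  0 ≤ n ∧ (2 ≤ n → 6 ≤ rollMax.length ∧ ∀ r ∈ rollMax.take 6, 1 ≤ r ∧ r ≤ 15)

instance (n : Int) (rollMax : List Int) : Decidable (Pre_dieSimulator n rollMax) := by
  unfold Pre_dieSimulator; infer_instance

def pvWitness_dieSimulator : Int × List Int := (3, [2, 3, 1, 15, 4, 5])

def Spec_dieSimulator (n : Int) (rollMax : List Int) (out : Int) : Prop := out = dieSimulator_alt n rollMax
instance (n : Int) (rollMax : List Int) (out : Int) : Decidable (Spec_dieSimulator n rollMax out) := by unfold Spec_dieSimulator; infer_instance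

-- ===== CLAIM (what is proved, stated in full; the proofs are below) =====
def Claim_equal_dieSimulator : Prop := ∀ (n : Int) (rollMax : List Int), Dom_dieSimulator n rollMax → Pre_dieSimulator n rollMax → Spec_dieSimulator n rollMax (dieSimulator n rollMax)

-- ===== LEMMAS AND PROOFS =====

-- Both loops are reduced to one shared mathematical model `pvMS`: the state after sequences of
-- length i is (f, new) where f j = #sequences ending with face j (mod), new t j = #sequences of
-- length t whose last run starts at position t.

def pvRmN (rollMax : List Int) (j : ℕ) : ℕ := (rollMax.getD j 0).toNat

def pvSum (c : ℕ) (f : ℕ → Int) : Int := ((List.range c).map f).sum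

def pvStep (rollMax : List Int) (i : ℕ) (s : (ℕ → Int) × (ℕ → ℕ → Int)) :
    (ℕ → Int) × (ℕ → ℕ → Int) :=
  let T : Int := (pvSum 6 s.1) % pvM
  let nr : ℕ → Int := fun j => (T - s.1 j) % pvM
  let nw : ℕ → ℕ → Int := fun t j => if t = i then nr j else s.2 t j
  let f : ℕ → Int := fun j =>
    if pvRmN rollMax j < i then
      ((s.1 j + nr j) % pvM - nw (i - pvRmN rollMax j) j) % pvM
    else (s.1 j + nr j) % pvM
  (f, nw)

def pvMS (rollMax : List Int) : ℕ → ((ℕ → Int) × (ℕ → ℕ → Int))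
  | 0 => (fun _ => 1, fun t _ => if t = 1 then 1 else 0)
  | Nat.succ k => pvStep rollMax (k+2) (pvMS rollMax k)

def pvNew (rollMax : List Int) (t j : ℕ) : Int := (pvMS rollMax (t-1)).2 t j
def pvF (rollMax : List Int) (i j : ℕ) : Int := (pvMS rollMax (i-1)).1 j
def pvSA (rollMax : List Int) (i j : ℕ) : Int :=
  pvSum (min (pvRmN rollMax j) i) (fun k => pvNew rollMax (i-k) j)

-- A-side table abstraction
def pvFV (rollMax : List Int) (a b c : ℕ) : Int :=
  if 1 ≤ c ∧ c ≤ a ∧ (c = 1 ∨ c ≤ pvRmN rollMax (b-1)) then pvNew rollMax (a - c + 1) (b-1) else 0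

def pvGA (rollMax : List Int) (m jd : ℕ) (a b c : ℕ) : Int :=
  if 1 ≤ a ∧ 1 ≤ b ∧ b ≤ 6 ∧ (a < m ∨ (a = m ∧ b ≤ jd)) then pvFV rollMax a b c else 0

def pvTbl (L : ℕ) (G : ℕ → ℕ → ℕ → Int) : List (List (List Int)) :=
  (List.range L).map (fun a => (List.range 7).map (fun b => (List.range 16).map (fun c => G a b c)))


-- ---- generic helpers ----

theorem pvmod (a : Int) : PySem.Int.mod a pvM = a % pvM :=
  PySem.Int.mod_eq_emod_of_pos (by norm_num [pvM])

theorem pvSum_zero (f : ℕ → Int) : pvSum 0 f = 0 := rfl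

theorem pvSum_succ (c : ℕ) (f : ℕ → Int) : pvSum (c+1) f = pvSum c f + f c := by
  simp [pvSum, List.range_succ]

theorem pvSum_congr {c : ℕ} {f g : ℕ → Int} (h : ∀ k < c, f k = g k) :
    pvSum c f = pvSum c g := by
  unfold pvSum
  congr 1
  exact List.map_congr_left (fun k hk => h k (List.mem_range.mp hk))

theorem pvSum_ite_lt (c n : ℕ) (hc : c ≤ n) (g : ℕ → Int) :
    pvSum n (fun k => if k < c then g k else 0) = pvSum c g := by
  induction n with
  | zero => interval_cases c; rfl
  | succ m ih =>
    rcases Nat.lt_or_ge c (m+1) with h | h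
    · rw [pvSum_succ, ih (by omega), if_neg (by omega), add_zero]
    · have hc' : c = m + 1 := by omega
      subst hc'
      rw [pvSum_succ, pvSum_succ, if_pos (by omega)]
      congr 1
      exact pvSum_congr (fun k hk => by rw [if_pos (by omega)])

theorem pvSum_mod (c : ℕ) (g : ℕ → Int) :
    pvSum c (fun k => g k % pvM) % pvM = pvSum c g % pvM := by
  induction c with
  | zero => rfl
  | succ m ih =>
    rw [pvSum_succ, pvSum_succ, Int.add_emod, ih, Int.emod_emod_of_dvd _ dvd_rfl,
      ← Int.add_emod]

theorem pvSet_map_range {α : Type} (n : ℕ) (f : ℕ → α) (i : ℕ) (v : α) :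
    ((List.range n).map f).set i v = (List.range n).map (fun x => if x = i then v else f x) := by
  apply List.ext_getElem (by simp)
  intro k h1 h2
  simp only [List.length_map, List.length_range] at h1
  rcases eq_or_ne k i with h | h
  · subst h
    simp [List.getElem_set, h1]
  · simp [List.getElem_set, h, Ne.symm h]

theorem pvGetD_map_range {α : Type} (n : ℕ) (f : ℕ → α) (i : ℕ) (d : α) :
    ((List.range n).map f).getD i d = if i < n then f i else d := by
  split
  · exact PySem.List.getD_map_range f n i d ‹_›
  · exact List.getD_eq_default _ _ (by simp; omega)

theorem modfold {α : Type} (g : α → Int) :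
    ∀ (l : List α) (a : Int),
      l.foldl (fun t x => PySem.Int.mod (t + g x) pvM) (a % pvM)
        = (a + (l.map g).sum) % pvM := by
  intro l
  induction l with
  | nil => intro a; simp
  | cons x xs ih =>
    intro a
    simp only [List.foldl_cons, List.map_cons, List.sum_cons, pvmod]
    have h : (a % pvM + g x) % pvM = (a + g x) % pvM := by
      rw [Int.add_emod, Int.emod_emod_of_dvd _ dvd_rfl, ← Int.add_emod]
    have ih' := ih (a + g x)
    simp only [pvmod] at ih'
    rw [h, ih', add_assoc]

-- ---- table lemmas ----

theorem pvTbl_get3 (L : ℕ) (G : ℕ → ℕ → ℕ → Int) (i j k : Int) :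
    pvGet3 (pvTbl L G) i j k =
      if i.toNat < L ∧ j.toNat < 7 ∧ k.toNat < 16 then G i.toNat j.toNat k.toNat else 0 := by
  unfold pvGet3 pvTbl
  rw [pvGetD_map_range]
  by_cases hi : i.toNat < L
  · rw [if_pos hi, pvGetD_map_range]
    by_cases hj : j.toNat < 7
    · rw [if_pos hj, pvGetD_map_range]
      by_cases hk : k.toNat < 16
      · rw [if_pos hk, if_pos ⟨hi, hj, hk⟩]
      · rw [if_neg hk, if_neg (by tauto)]
    · rw [if_neg hj, if_neg (by tauto)]
      simp
  · rw [if_neg hi, if_neg (by tauto)]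
    simp

theorem pvTbl_congr {L : ℕ} {G G' : ℕ → ℕ → ℕ → Int}
    (h : ∀ a < L, ∀ b < 7, ∀ c < 16, G a b c = G' a b c) : pvTbl L G = pvTbl L G' := by
  unfold pvTbl
  apply List.map_congr_left
  intro a ha
  apply List.map_congr_left
  intro b hb
  apply List.map_congr_left
  intro c hc
  exact h a (List.mem_range.mp ha) b (List.mem_range.mp hb) c (List.mem_range.mp hc)

theorem pvTbl_set3 (L : ℕ) (G : ℕ → ℕ → ℕ → Int) (i j k : Int) (v : Int)
    (hi : i.toNat < L) (hj : j.toNat < 7) (hk : k.toNat < 16) :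
    pvSet3 (pvTbl L G) i j k v
      = pvTbl L (fun a b c => if a = i.toNat ∧ b = j.toNat ∧ c = k.toNat then v else G a b c) := by
  unfold pvSet3
  have h1 : (pvTbl L G).getD i.toNat [] =
      (List.range 7).map (fun b => (List.range 16).map (fun c => G i.toNat b c)) := by
    unfold pvTbl; rw [pvGetD_map_range, if_pos hi]
  rw [h1, pvGetD_map_range, if_pos hj, pvSet_map_range, pvSet_map_range]
  conv_lhs => rw [pvTbl]
  rw [pvSet_map_range]
  unfold pvTbl
  apply List.map_congr_left
  intro a _
  rcases eq_or_ne a i.toNat with h | h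
  · subst h
    rw [if_pos rfl]
    apply List.map_congr_left
    intro b _
    rcases eq_or_ne b j.toNat with h' | h'
    · subst h'
      rw [if_pos rfl]
      apply List.map_congr_left
      intro c _
      rcases eq_or_ne c k.toNat with h'' | h''
      · subst h''; simp
      · simp [h'']
    · rw [if_neg h']
      apply List.map_congr_left
      intro c _
      exact (if_neg (by tauto)).symm
  · rw [if_neg h]
    apply List.map_congr_left
    intro b _
    apply List.map_congr_left
    intro c _
    exact (if_neg (by tauto)).symm

-- ---- model lemmas ----

theorem pvNew_one (rollMax : List Int) (j : ℕ) : pvNew rollMax 1 j = 1 := rfl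

theorem pvF_one (rollMax : List Int) (j : ℕ) : pvF rollMax 1 j = 1 := rfl

theorem pvNew_stable (rollMax : List Int) (k t j : ℕ) (h1 : 1 ≤ t) (h2 : t ≤ k + 1) :
    (pvMS rollMax k).2 t j = pvNew rollMax t j := by
  induction k with
  | zero =>
    have ht : t = 1 := by omega
    subst ht; rfl
  | succ k ih =>
    rcases eq_or_ne t (k + 2) with h | h
    · subst h; rfl
    · show (pvStep rollMax (k+2) (pvMS rollMax k)).2 t j = pvNew rollMax t j
      simp only [pvStep]
      rw [if_neg h]
      exact ih (by omega)

theorem pvNew_succ (rollMax : List Int) (m j : ℕ) (hm : 1 ≤ m) :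
    pvNew rollMax (m+1) j
      = ((pvSum 6 (fun l => pvF rollMax m l)) % pvM - pvF rollMax m j) % pvM := by
  show (pvMS rollMax ((m+1)-1)).2 (m+1) j = _
  have : (m+1) - 1 = (m-1) + 1 := by omega
  rw [this]
  show (pvStep rollMax (m-1+2) (pvMS rollMax (m-1))).2 (m+1) j = _
  have h2 : m - 1 + 2 = m + 1 := by omega
  rw [h2]
  simp only [pvStep, if_true]
  rfl

theorem pvF_succ (rollMax : List Int) (iN j : ℕ) (h : 2 ≤ iN) (hrm : 1 ≤ pvRmN rollMax j) :
    pvF rollMax iN j = if pvRmN rollMax j < iN then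
        ((pvF rollMax (iN-1) j + pvNew rollMax iN j) % pvM
          - pvNew rollMax (iN - pvRmN rollMax j) j) % pvM
      else (pvF rollMax (iN-1) j + pvNew rollMax iN j) % pvM := by
  obtain ⟨k, rfl⟩ : ∃ k, iN = k + 2 := ⟨iN - 2, by omega⟩
  have hnr : pvNew rollMax (k+2) j
      = ((pvSum 6 ((pvMS rollMax k).1)) % pvM - (pvMS rollMax k).1 j) % pvM := by
    rw [pvNew_succ rollMax (k+1) j (by omega)]
    rfl
  show (pvStep rollMax (k+2) (pvMS rollMax k)).1 j = _
  simp only [pvStep]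
  rcases Nat.lt_or_ge (pvRmN rollMax j) (k+2) with hlt | hge
  · rw [if_pos hlt, if_pos hlt]
    have hne : k + 2 - pvRmN rollMax j ≠ k + 2 := by omega
    rw [if_neg hne, pvNew_stable rollMax k _ j (by omega) (by omega), ← hnr]
    have hf : (pvMS rollMax k).1 j = pvF rollMax (k+2-1) j := by
      show _ = (pvMS rollMax (k+2-1-1)).1 j
      norm_num
    rw [hf]
  · rw [if_neg (by omega), if_neg (by omega), ← hnr]
    have hf : (pvMS rollMax k).1 j = pvF rollMax (k+2-1) j := by
      show _ = (pvMS rollMax (k+2-1-1)).1 j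
      norm_num
    rw [hf]


theorem pvSum_shift (rollMax : List Int) (m r j : ℕ) :
    pvSum (r+1) (fun k => pvNew rollMax (m+1-k) j)
      = pvNew rollMax (m+1) j + pvSum r (fun k => pvNew rollMax (m-k) j) := by
  rw [pvSum, List.range_succ_eq_map]
  simp only [List.map_cons, List.map_map, List.sum_cons]
  congr 1
  rw [pvSum]
  apply congrArg
  apply List.map_congr_left
  intro k _
  simp only [Function.comp_apply]
  congr 1
  omega

theorem pvF_eq (rollMax : List Int) (j : ℕ) (hrm : 1 ≤ pvRmN rollMax j) :
    ∀ i, 1 ≤ i → pvF rollMax i j = pvSA rollMax i j % pvM := by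
  intro i
  induction i with
  | zero => omega
  | succ m ih =>
    intro _
    rcases Nat.lt_or_ge m 1 with hm | hm
    · have : m = 0 := by omega
      subst this
      rw [pvF_one]
      have hmin : min (pvRmN rollMax j) 1 = 1 := by omega
      rw [pvSA, hmin, pvSum_succ, pvSum_zero]
      norm_num [pvNew_one]
      decide
    · -- m ≥ 1, step from m to m+1
      have hF := pvF_succ rollMax (m+1) j (by omega) hrm
      simp only [Nat.add_sub_cancel] at hF
      have hIH := ih hm
      rcases Nat.lt_or_ge (pvRmN rollMax j) (m+1) with hlt | hge
      · -- window full: SA (m+1) = new(m+1) + SA m - new(m+1-rm)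
        have hSA1 : pvSA rollMax (m+1) j
            = pvNew rollMax (m+1) j + pvSA rollMax m j - pvNew rollMax (m+1-pvRmN rollMax j) j := by
          rw [pvSA, pvSA]
          have h1 : min (pvRmN rollMax j) (m+1) = pvRmN rollMax j := by omega
          have h2 : min (pvRmN rollMax j) m = pvRmN rollMax j := by omega
          rw [h1, h2]
          obtain ⟨r, hr⟩ : ∃ r, pvRmN rollMax j = r + 1 := ⟨pvRmN rollMax j - 1, by omega⟩
          rw [hr, pvSum_shift, pvSum_succ]
          have h3 : m - r = m + 1 - (r+1) := by omega
          rw [h3]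
          ring
        rw [hF, if_pos hlt, hIH, hSA1]
        rw [Int.add_emod, Int.emod_emod_of_dvd _ dvd_rfl, ← Int.add_emod]
        rw [Int.sub_emod, Int.emod_emod_of_dvd _ dvd_rfl, ← Int.sub_emod]
        congr 1
        ring
      · -- window growing: SA (m+1) = new(m+1) + SA m
        have hSA1 : pvSA rollMax (m+1) j = pvNew rollMax (m+1) j + pvSA rollMax m j := by
          rw [pvSA, pvSA]
          have h1 : min (pvRmN rollMax j) (m+1) = m+1 := by omega
          have h2 : min (pvRmN rollMax j) m = m := by omega
          rw [h1, h2, pvSum_shift]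
        rw [hF, if_neg (by omega), hIH, hSA1]
        rw [Int.add_emod, Int.emod_emod_of_dvd _ dvd_rfl, ← Int.add_emod]
        congr 1
        ring

-- ---- A-side loop lemmas ----

theorem pvInnerSum (L : ℕ) (G : ℕ → ℕ → ℕ → Int) (r l : Int) (a : Int)
    (hr : 0 ≤ r) (hrL : r.toNat < L) (hl1 : 1 ≤ l) (hl6 : l ≤ 6) :
    (PySem.List.pyRange 1 16 1).foldl
      (fun res kk => PySem.Int.mod (res + pvGet3 (pvTbl L G) r l kk) pvM) (a % pvM)
    = (a + pvSum 15 (fun kk => G r.toNat l.toNat (kk+1))) % pvM := by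
  rw [modfold (fun kk : Int => pvGet3 (pvTbl L G) r l kk)]
  have hsum : ((PySem.List.pyRange 1 16 1).map (fun kk : Int => pvGet3 (pvTbl L G) r l kk)).sum
      = pvSum 15 (fun kk => G r.toNat l.toNat (kk+1)) := by
    rw [PySem.List.pyRange_one]
    have h15 : ((16:Int) - 1).toNat = 15 := by decide
    rw [h15, List.map_map, pvSum]
    congr 1
    apply List.map_congr_left
    intro k hk
    have hk15 : k < 15 := List.mem_range.mp hk
    simp only [Function.comp_apply]
    rw [pvTbl_get3, if_pos]
    · congr 1 <;> omega
    · refine ⟨by omega, by omega, by omega⟩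
  rw [hsum]

theorem pvKloop (L : ℕ) (i j : Int) (hi2 : 2 ≤ i) (hiL : i.toNat < L)
    (hj1 : 1 ≤ j) (hj6 : j ≤ 6) :
    ∀ (d : ℕ) (k0 b : Int) (G : ℕ → ℕ → ℕ → Int), 2 ≤ k0 → k0 + d = b → b ≤ 16 →
    (PySem.List.pyRange k0 b 1).foldl
        (fun dp k => pvSet3 dp i j k (pvGet3 dp (i-1) j (k-1))) (pvTbl L G)
      = pvTbl L (fun a b' c =>
          if a = i.toNat ∧ b' = j.toNat ∧ k0.toNat ≤ c ∧ c < b.toNat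
          then G (i.toNat - 1) j.toNat (c-1) else G a b' c) := by
  intro d
  induction d with
  | zero =>
    intro k0 b G hk0 hkb _
    have hb : b ≤ k0 := by omega
    rw [PySem.List.pyRange_one_eq_nil hb, List.foldl_nil]
    apply pvTbl_congr
    intro a _ b' _ c _
    rw [if_neg (by omega)]
  | succ d ih =>
    intro k0 b G hk0 hkb hb16
    have hk0b : k0 < b := by omega
    rw [PySem.List.pyRange_one_cons hk0b, List.foldl_cons]
    have hv : pvGet3 (pvTbl L G) (i-1) j (k0-1) = G (i.toNat - 1) j.toNat (k0.toNat - 1) := by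
      rw [pvTbl_get3, if_pos]
      · congr 1 <;> omega
      · refine ⟨by omega, by omega, by omega⟩
    rw [hv, pvTbl_set3 L G i j k0 _ hiL (by omega) (by omega)]
    rw [ih (k0+1) b _ (by omega) (by omega) hb16]
    apply pvTbl_congr
    intro a _ b' _ c _
    simp only []
    split_ifs <;> first | rfl | omega | (congr 1 <;> omega)

theorem pvResfold (L : ℕ) (G : ℕ → ℕ → ℕ → Int) (r j : Int)
    (hr : 0 ≤ r) (hrL : r.toNat < L) :
    ∀ (ls : List Int) (a a0 : Int), a0 = a % pvM → (∀ l ∈ ls, 1 ≤ l ∧ l ≤ 6) →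
    ls.foldl (fun res l =>
        if l ≠ j then
          (PySem.List.pyRange 1 16 1).foldl
            (fun res kk => PySem.Int.mod (res + pvGet3 (pvTbl L G) r l kk) pvM) res
        else res) a0
      = (a + ((ls.filter (fun l => l ≠ j)).map
          (fun l => pvSum 15 (fun kk => G r.toNat l.toNat (kk+1)))).sum) % pvM := by
  intro ls
  induction ls with
  | nil => intro a a0 ha0 _; simp [ha0]
  | cons l ls ih =>
    intro a a0 ha0 hb
    obtain ⟨hl, hls⟩ := List.forall_mem_cons.mp hb
    subst ha0
    rw [List.foldl_cons]
    rcases eq_or_ne l j with h | h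
    · subst h
      rw [if_neg (by simp), List.filter_cons_of_neg (by simp)]
      exact ih a _ rfl hls
    · rw [if_pos h, pvInnerSum L G r l a hr hrL hl.1 hl.2,
        List.filter_cons_of_pos (by simpa using h), ih _ _ rfl hls, List.map_cons, List.sum_cons]
      rw [add_assoc]

theorem pvFilterSum (j : Int) (h1 : 1 ≤ j) (h6 : j ≤ 6) (h : ℕ → Int) :
    (((PySem.List.pyRange 1 7 1).filter (fun l => l ≠ j)).map (fun l => h l.toNat)).sum
      = pvSum 6 (fun l => h (l+1)) - h j.toNat := by
  have hr : PySem.List.pyRange 1 7 1 = [1,2,3,4,5,6] := by decide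
  rw [hr]
  interval_cases j <;>
    simp [pvSum_succ, pvSum_zero] <;>
    norm_num <;> ring

theorem pvFVsum (rollMax : List Int) (m l : ℕ) (hm : 1 ≤ m) (hl1 : 1 ≤ l) (hl6 : l ≤ 6)
    (hrm1 : 1 ≤ pvRmN rollMax (l-1)) (hrm15 : pvRmN rollMax (l-1) ≤ 15) :
    pvSum 15 (fun kk => pvFV rollMax m l (kk+1)) = pvSA rollMax m (l-1) := by
  rw [pvSA]
  have hcm : min (pvRmN rollMax (l-1)) m ≤ 15 := by omega
  rw [← pvSum_ite_lt _ 15 hcm]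
  apply pvSum_congr
  intro k hk
  rw [pvFV]
  by_cases hcond : k < min (pvRmN rollMax (l-1)) m
  · rw [if_pos (by omega), if_pos hcond]
    congr 1
    omega
  · rw [if_neg (by omega), if_neg hcond]

theorem pvSumloop (L : ℕ) (G : ℕ → ℕ → ℕ → Int) (r : Int)
    (hr : 0 ≤ r) (hrL : r.toNat < L) :
    ∀ (ls : List Int) (a a0 : Int), a0 = a % pvM → (∀ l ∈ ls, 1 ≤ l ∧ l ≤ 6) →
    ls.foldl (fun s l =>
        (PySem.List.pyRange 1 16 1).foldl
          (fun s kk => PySem.Int.mod (s + pvGet3 (pvTbl L G) r l kk) pvM) s) a0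
      = (a + (ls.map (fun l => pvSum 15 (fun kk => G r.toNat l.toNat (kk+1)))).sum) % pvM := by
  intro ls
  induction ls with
  | nil => intro a a0 h _; simp [h]
  | cons l ls ih =>
    intro a a0 h hb
    obtain ⟨hl, hls⟩ := List.forall_mem_cons.mp hb
    subst h
    rw [List.foldl_cons, pvInnerSum L G r l a hr hrL hl.1 hl.2,
      ih (a + pvSum 15 (fun kk => G r.toNat l.toNat (kk+1))) _ rfl hls,
      List.map_cons, List.sum_cons, add_assoc]

theorem pvSixSum (h : ℕ → Int) :
    (([1,2,3,4,5,6] : List Int).map (fun l => h l.toNat)).sum = pvSum 6 (fun l => h (l+1)) := by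
  simp [pvSum_succ, pvSum_zero]
  ring

-- the face update of A's row loop, for a row i ≥ 2
theorem pvAface_eq (L : ℕ) (rollMax : List Int) (i j : Int) (jd : ℕ)
    (hi : 2 ≤ i) (hiL : i.toNat < L) (hj1 : 1 ≤ j) (hj6 : j ≤ 6) (hjd : jd + 1 = j.toNat)
    (hent : ∀ l < 6, 1 ≤ rollMax.getD l 0 ∧ rollMax.getD l 0 ≤ 15) :
    pvAface rollMax i (pvTbl L (pvGA rollMax i.toNat jd)) j
      = pvTbl L (pvGA rollMax i.toNat (jd+1)) := by
  have hrm1 : ∀ l < 6, 1 ≤ pvRmN rollMax l := by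
    intro l hl; have := hent l hl; rw [pvRmN]; omega
  have hrm15 : ∀ l < 6, pvRmN rollMax l ≤ 15 := by
    intro l hl; have := hent l hl; rw [pvRmN]; omega
  have hjd6 : jd < 6 := by omega
  unfold pvAface
  rw [if_neg (by omega)]
  simp only []
  have hidx : (j-1).toNat = jd := by omega
  have hent' := hent jd hjd6
  have hnn : (0:Int) ≤ rollMax.getD jd 0 := by omega
  have hrm1' : 1 ≤ pvRmN rollMax jd := hrm1 jd hjd6
  have hrm15' : pvRmN rollMax jd ≤ 15 := hrm15 jd hjd6
  have hcast : rollMax.getD (j-1).toNat 0 + 1 = ((pvRmN rollMax jd + 1 : ℕ) : Int) := by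
    rw [hidx, pvRmN]
    push_cast [Int.toNat_of_nonneg hnn]
    ring
  rw [hcast]
  rw [pvKloop L i j hi hiL hj1 hj6 (pvRmN rollMax jd - 1) 2 ((pvRmN rollMax jd + 1 : ℕ) : Int)
    (pvGA rollMax i.toNat jd) (by omega) (by push_cast; omega) (by push_cast; omega)]
  rw [pvResfold L _ (i-1) j (by omega) (by omega) (PySem.List.pyRange 1 7 1) 0 0
    (Int.zero_emod pvM).symm
    (by intro l hl; have := PySem.List.mem_pyRange_one.mp hl; omega)]
  -- rewrite the per-face sums into pvSA
  have hmap : ((PySem.List.pyRange 1 7 1).filter (fun l => l ≠ j)).map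
        (fun l => pvSum 15 (fun kk =>
          (fun a b' c =>
            if a = i.toNat ∧ b' = j.toNat ∧ (2:Int).toNat ≤ c ∧ c < ((pvRmN rollMax jd + 1 : ℕ) : Int).toNat
            then pvGA rollMax i.toNat jd (i.toNat - 1) j.toNat (c-1) else pvGA rollMax i.toNat jd a b' c)
          (i-1).toNat l.toNat (kk+1)))
      = ((PySem.List.pyRange 1 7 1).filter (fun l => l ≠ j)).map
        (fun l => pvSA rollMax (i.toNat - 1) (l.toNat - 1)) := by
    apply List.map_congr_left
    intro l hl
    have hl' := PySem.List.mem_pyRange_one.mp (List.mem_of_mem_filter hl)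
    have hsc : ∀ kk < 15,
        (fun a b' c =>
            if a = i.toNat ∧ b' = j.toNat ∧ (2:Int).toNat ≤ c ∧ c < ((pvRmN rollMax jd + 1 : ℕ) : Int).toNat
            then pvGA rollMax i.toNat jd (i.toNat - 1) j.toNat (c-1) else pvGA rollMax i.toNat jd a b' c)
          (i-1).toNat l.toNat (kk+1)
        = pvFV rollMax (i.toNat - 1) l.toNat (kk+1) := by
      intro kk _
      simp only []
      rw [if_neg (by omega), pvGA, if_pos (by omega)]
      have h' : (i-1).toNat = i.toNat - 1 := by omega
      rw [h']
    rw [pvSum_congr hsc]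
    exact pvFVsum rollMax (i.toNat - 1) l.toNat (by omega) (by omega) (by omega)
      (hrm1 _ (by omega)) (hrm15 _ (by omega))
  rw [hmap]
  have hfs := pvFilterSum j hj1 hj6 (fun l' => pvSA rollMax (i.toNat - 1) (l'-1))
  rw [hfs]
  -- res = pvNew i.toNat jd
  have hresval : (0 + (pvSum 6 (fun l => pvSA rollMax (i.toNat - 1) ((l+1)-1))
        - pvSA rollMax (i.toNat - 1) (j.toNat - 1))) % pvM
      = pvNew rollMax i.toNat jd := by
    rw [zero_add]
    have hnew := pvNew_succ rollMax (i.toNat - 1) jd (by omega)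
    have hstep : i.toNat - 1 + 1 = i.toNat := by omega
    rw [hstep] at hnew
    rw [hnew]
    have hf : ∀ l < 6, pvF rollMax (i.toNat - 1) l = pvSA rollMax (i.toNat - 1) l % pvM :=
      fun l hl => pvF_eq rollMax l (hrm1 l hl) _ (by omega)
    rw [pvF_eq rollMax jd (hrm1 _ (by omega)) _ (by omega)]
    rw [pvSum_congr hf]
    have hjj : j.toNat - 1 = jd := by omega
    rw [hjj]
    have hLHS : pvSum 6 (fun l => pvSA rollMax (i.toNat - 1) ((l+1)-1))
        = pvSum 6 (fun l => pvSA rollMax (i.toNat - 1) l) :=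
      pvSum_congr (fun k _ => by congr 1)
    rw [hLHS]
    rw [Int.sub_emod (pvSum 6 fun l => pvSA rollMax (i.toNat - 1) l)]
    rw [pvSum_mod]
  rw [hresval]
  rw [pvTbl_set3 L _ i j 1 _ hiL (by omega) (by omega)]
  apply pvTbl_congr
  intro a ha b' hb' c hc
  by_cases hbj : b' = j.toNat
  · subst hbj
    have hjj : j.toNat - 1 = jd := by omega
    by_cases hai : a = i.toNat
    · subst hai
      by_cases hc1 : c = 1
      · subst hc1
        rw [if_pos ⟨rfl, rfl, rfl⟩, pvGA, if_pos (by omega), pvFV, if_pos (by omega), hjj]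
        congr 2 <;> omega
      · rw [if_neg (by omega)]
        by_cases hck : 2 ≤ c ∧ c < pvRmN rollMax jd + 1
        · rw [if_pos ⟨rfl, rfl, by omega, by omega⟩, pvGA, if_pos (by omega),
            pvGA, if_pos (by omega), pvFV, pvFV, hjj]
          split_ifs <;> first | rfl | omega | (congr 2 <;> omega)
        · rw [if_neg (by omega), pvGA, if_neg (by omega), pvGA, if_pos (by omega),
            pvFV, hjj, if_neg (by omega)]
    · rw [if_neg (by omega), if_neg (by omega), pvGA, pvGA]
      split_ifs <;> first | rfl | omega
  · rw [if_neg (by omega), if_neg (by omega), pvGA, pvGA]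
    split_ifs <;> first | rfl | omega

theorem pvArow (L : ℕ) (rollMax : List Int) (i : Int) (hi : 2 ≤ i) (hiL : i.toNat < L)
    (hent : ∀ l < 6, 1 ≤ rollMax.getD l 0 ∧ rollMax.getD l 0 ≤ 15) :
    (PySem.List.pyRange 1 7 1).foldl (pvAface rollMax i) (pvTbl L (pvGA rollMax i.toNat 0))
      = pvTbl L (pvGA rollMax i.toNat 6) := by
  have h7 : PySem.List.pyRange 1 7 1 = [1,2,3,4,5,6] := by decide
  rw [h7]
  simp only [List.foldl_cons, List.foldl_nil]
  rw [pvAface_eq L rollMax i 1 0 hi hiL (by norm_num) (by norm_num) (by decide) hent,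
      pvAface_eq L rollMax i 2 (0+1) hi hiL (by norm_num) (by norm_num) (by decide) hent,
      pvAface_eq L rollMax i 3 (0+1+1) hi hiL (by norm_num) (by norm_num) (by decide) hent,
      pvAface_eq L rollMax i 4 (0+1+1+1) hi hiL (by norm_num) (by norm_num) (by decide) hent,
      pvAface_eq L rollMax i 5 (0+1+1+1+1) hi hiL (by norm_num) (by norm_num) (by decide) hent,
      pvAface_eq L rollMax i 6 (0+1+1+1+1+1) hi hiL (by norm_num) (by norm_num) (by decide) hent]

theorem pvArow1 (L : ℕ) (rollMax : List Int) (hL : 2 ≤ L) :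
    (PySem.List.pyRange 1 7 1).foldl (pvAface rollMax 1) (pvTbl L (fun _ _ _ => 0))
      = pvTbl L (pvGA rollMax 1 6) := by
  have h7 : PySem.List.pyRange 1 7 1 = [1,2,3,4,5,6] := by decide
  rw [h7]
  simp only [List.foldl_cons, List.foldl_nil, pvAface, eq_self_iff_true, if_true]
  rw [pvTbl_set3 L _ 1 1 1 _ (by omega) (by omega) (by omega),
      pvTbl_set3 L _ 1 2 1 _ (by omega) (by omega) (by omega),
      pvTbl_set3 L _ 1 3 1 _ (by omega) (by omega) (by omega),
      pvTbl_set3 L _ 1 4 1 _ (by omega) (by omega) (by omega),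
      pvTbl_set3 L _ 1 5 1 _ (by omega) (by omega) (by omega),
      pvTbl_set3 L _ 1 6 1 _ (by omega) (by omega) (by omega)]
  apply pvTbl_congr
  intro a _ b' _ c _
  rw [pvGA, pvFV]
  split_ifs <;> first | rfl | omega | (rw [show a - c + 1 = 1 by omega, pvNew_one])

theorem pvAouter (L : ℕ) (rollMax : List Int) (n : Int) (hn : 2 ≤ n) (hL : L = (n+1).toNat)
    (hent : ∀ l < 6, 1 ≤ rollMax.getD l 0 ∧ rollMax.getD l 0 ≤ 15) :
    ∀ (d : ℕ) (m : Int), 2 ≤ m → m + d = n + 1 →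
    (PySem.List.pyRange m (n+1) 1).foldl
        (fun dp i => (PySem.List.pyRange 1 7 1).foldl (pvAface rollMax i) dp)
        (pvTbl L (pvGA rollMax m.toNat 0))
      = pvTbl L (pvGA rollMax (n+1).toNat 0) := by
  intro d
  induction d with
  | zero =>
    intro m hm hmn
    have : m = n + 1 := by omega
    subst this
    rw [show PySem.List.pyRange (n+1) (n+1) 1 = [] from PySem.List.pyRange_one_eq_nil (by omega),
      List.foldl_nil]
  | succ d ih =>
    intro m hm hmn
    rw [show PySem.List.pyRange m (n+1) 1 = m :: PySem.List.pyRange (m+1) (n+1) 1 from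
      PySem.List.pyRange_one_cons (by omega), List.foldl_cons]
    rw [pvArow L rollMax m hm (by omega) hent]
    have hstep : pvTbl L (pvGA rollMax m.toNat 6) = pvTbl L (pvGA rollMax (m+1).toNat 0) := by
      apply pvTbl_congr
      intro a _ b' _ c _
      rw [pvGA, pvGA]
      split_ifs <;> first | rfl | omega
    rw [hstep]
    exact ih (m+1) (by omega) (by omega)

theorem pvAfinal (L : ℕ) (rollMax : List Int) (n : Int) (hn : 2 ≤ n) (hL : L = (n+1).toNat)
    (hent : ∀ l < 6, 1 ≤ rollMax.getD l 0 ∧ rollMax.getD l 0 ≤ 15) :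
    (PySem.List.pyRange 1 7 1).foldl (fun s j =>
        (PySem.List.pyRange 1 16 1).foldl
          (fun s k => PySem.Int.mod (s + pvGet3 (pvTbl L (pvGA rollMax (n+1).toNat 0)) n j k) pvM) s) 0
      = pvSum 6 (fun l => pvSA rollMax n.toNat l) % pvM := by
  have hrm1 : ∀ l < 6, 1 ≤ pvRmN rollMax l := by
    intro l hl; have := hent l hl; rw [pvRmN]; omega
  have hrm15 : ∀ l < 6, pvRmN rollMax l ≤ 15 := by
    intro l hl; have := hent l hl; rw [pvRmN]; omega
  rw [pvSumloop L (pvGA rollMax (n+1).toNat 0) n (by omega) (by omega)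
    (PySem.List.pyRange 1 7 1) 0 0 (Int.zero_emod pvM).symm
    (by intro l hl; have := PySem.List.mem_pyRange_one.mp hl; omega)]
  have h7 : PySem.List.pyRange 1 7 1 = [1,2,3,4,5,6] := by decide
  rw [h7]
  have hmap : (([1,2,3,4,5,6] : List Int).map
        (fun l => pvSum 15 (fun kk => pvGA rollMax (n+1).toNat 0 n.toNat l.toNat (kk+1))))
      = ([1,2,3,4,5,6] : List Int).map (fun l => pvSA rollMax n.toNat (l.toNat - 1)) := by
    apply List.map_congr_left
    intro l hl
    have hl' : 1 ≤ l ∧ l ≤ 6 := by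
      simp only [List.mem_cons, List.not_mem_nil, or_false] at hl
      rcases hl with rfl | rfl | rfl | rfl | rfl | rfl <;> norm_num
    have hsc : ∀ kk < 15, pvGA rollMax (n+1).toNat 0 n.toNat l.toNat (kk+1)
        = pvFV rollMax n.toNat l.toNat (kk+1) := by
      intro kk _
      rw [pvGA, if_pos (by omega)]
    rw [pvSum_congr hsc]
    exact pvFVsum rollMax n.toNat l.toNat (by omega) (by omega) (by omega)
      (hrm1 _ (by omega)) (hrm15 _ (by omega))
  rw [hmap, pvSixSum (fun x => pvSA rollMax n.toNat (x-1)), zero_add]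
  exact congrArg (· % pvM) (pvSum_congr (fun k _ => rfl))

-- A's value for n ≥ 2
theorem pvA_eq (rollMax : List Int) (n : Int) (hn : 2 ≤ n)
    (hent : ∀ l < 6, 1 ≤ rollMax.getD l 0 ∧ rollMax.getD l 0 ≤ 15) :
    dieSimulator n rollMax = pvSum 6 (fun l => pvSA rollMax n.toNat l) % pvM := by
  unfold dieSimulator
  simp only []
  have hdp0 : List.replicate (n+1).toNat (List.replicate 7 (List.replicate 16 (0:Int)))
      = pvTbl (n+1).toNat (fun _ _ _ => 0) := by
    simp [pvTbl, List.map_const', List.length_range]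
  rw [hdp0]
  rw [show PySem.List.pyRange 1 (n+1) 1 = 1 :: PySem.List.pyRange (1+1) (n+1) 1 from
    PySem.List.pyRange_one_cons (by omega), List.foldl_cons]
  rw [show (1:Int)+1 = 2 from by norm_num]
  rw [pvArow1 (n+1).toNat rollMax (by omega)]
  have hstep : pvTbl (n+1).toNat (pvGA rollMax 1 6)
      = pvTbl (n+1).toNat (pvGA rollMax ((2:Int)).toNat 0) := by
    apply pvTbl_congr
    intro a _ b' _ c _
    rw [pvGA, pvGA]
    split_ifs <;> first | rfl | omega
  rw [hstep]
  rw [pvAouter (n+1).toNat rollMax n hn rfl hent (n-1).toNat 2 (by omega) (by omega)]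
  exact pvAfinal (n+1).toNat rollMax n hn rfl hent

-- ---- B-side canonical states ----

def pvBnw (rollMax : List Int) (L iN jd : ℕ) : List (List Int) :=
  (List.range 6).map (fun l => (List.range L).map (fun t =>
    if 1 ≤ t ∧ (t ≤ iN - 1 ∨ (t = iN ∧ l < jd)) then pvNew rollMax t l else 0))

def pvBf (rollMax : List Int) (iN jd : ℕ) : List Int :=
  (List.range 6).map (fun l => if l < jd then pvF rollMax iN l else pvF rollMax (iN-1) l)

theorem pvBface_eq (L : ℕ) (rollMax : List Int) (n i : Int) (jd : ℕ)
    (hi : 2 ≤ i) (hin : i ≤ n) (hiL : i.toNat < L) (hjd : jd < 6)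
    (hent : ∀ l < 6, 1 ≤ rollMax.getD l 0 ∧ rollMax.getD l 0 ≤ 15) :
    pvBface rollMax n i (pvSum 6 (fun l => pvF rollMax (i.toNat - 1) l) % pvM)
      (pvBnw rollMax L i.toNat jd, pvBf rollMax i.toNat jd,
        pvSum jd (fun l => pvF rollMax i.toNat l) % pvM) jd
      = (pvBnw rollMax L i.toNat (jd+1), pvBf rollMax i.toNat (jd+1),
        pvSum (jd+1) (fun l => pvF rollMax i.toNat l) % pvM) := by
  have hrm1 : 1 ≤ pvRmN rollMax jd := by have := hent jd hjd; rw [pvRmN]; omega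
  have hrm15 : pvRmN rollMax jd ≤ 15 := by have := hent jd hjd; rw [pvRmN]; omega
  have hrmv : rollMax.getD jd 0 = ((pvRmN rollMax jd : ℕ) : Int) := by
    rw [pvRmN, Int.toNat_of_nonneg (by have := hent jd hjd; omega)]
  unfold pvBface
  simp only []
  have hfg : (pvBf rollMax i.toNat jd).getD jd 0 = pvF rollMax (i.toNat - 1) jd := by
    rw [pvBf, pvGetD_map_range, if_pos hjd, if_neg (lt_irrefl jd)]
  rw [hfg]
  have hnr : PySem.Int.mod (pvSum 6 (fun l => pvF rollMax (i.toNat - 1) l) % pvM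
        - pvF rollMax (i.toNat - 1) jd) pvM
      = pvNew rollMax i.toNat jd := by
    rw [pvmod]
    have h := pvNew_succ rollMax (i.toNat - 1) jd (by omega)
    rw [show i.toNat - 1 + 1 = i.toNat by omega] at h
    rw [h]
  rw [hnr]
  have hnwg : (pvBnw rollMax L i.toNat jd).getD jd [] = (List.range L).map (fun t =>
      if 1 ≤ t ∧ (t ≤ i.toNat - 1 ∨ (t = i.toNat ∧ jd < jd)) then pvNew rollMax t jd else 0) := by
    rw [pvBnw, pvGetD_map_range, if_pos hjd]
  rw [hnwg, pvSet_map_range]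
  have hnw2 : (pvBnw rollMax L i.toNat jd).set jd ((List.range L).map (fun t =>
        if t = i.toNat then pvNew rollMax i.toNat jd
        else if 1 ≤ t ∧ (t ≤ i.toNat - 1 ∨ (t = i.toNat ∧ jd < jd)) then pvNew rollMax t jd else 0))
      = pvBnw rollMax L i.toNat (jd+1) := by
    rw [pvBnw, pvSet_map_range]
    rw [pvBnw]
    apply List.map_congr_left
    intro l hl
    have hl6 := List.mem_range.mp hl
    by_cases hlj : l = jd
    · subst hlj
      rw [if_pos rfl]
      apply List.map_congr_left
      intro t ht
      have htL := List.mem_range.mp ht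
      by_cases hti : t = i.toNat
      · subst hti
        rw [if_pos rfl, if_pos (by omega)]
      · rw [if_neg hti]
        split_ifs <;> first | rfl | omega
    · rw [if_neg hlj]
      apply List.map_congr_left
      intro t _
      split_ifs <;> first | rfl | omega
  rw [hnw2]
  rw [pvBf, pvSet_map_range]
  have hf1g : ((List.range 6).map (fun l =>
        if l = jd then PySem.Int.mod (pvF rollMax (i.toNat - 1) jd + pvNew rollMax i.toNat jd) pvM
        else if l < jd then pvF rollMax i.toNat l else pvF rollMax (i.toNat - 1) l)).getD jd 0
      = PySem.Int.mod (pvF rollMax (i.toNat - 1) jd + pvNew rollMax i.toNat jd) pvM := by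
    rw [pvGetD_map_range, if_pos hjd, if_pos rfl]
  rw [hrmv]
  have hFs := pvF_succ rollMax i.toNat jd (by omega) hrm1
  by_cases hbr : pvRmN rollMax jd < i.toNat
  · rw [if_pos (by omega), hf1g]
    have hlk : ((pvBnw rollMax L i.toNat (jd+1)).getD jd []).getD
          (i - ((pvRmN rollMax jd : ℕ) : Int)).toNat 0
        = pvNew rollMax (i.toNat - pvRmN rollMax jd) jd := by
      rw [pvBnw, pvGetD_map_range, if_pos hjd, pvGetD_map_range,
        show (i - ((pvRmN rollMax jd : ℕ) : Int)).toNat = i.toNat - pvRmN rollMax jd by omega,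
        if_pos (by omega), if_pos (by omega)]
    rw [hlk, pvSet_map_range]
    have hval : (fun l => if l = jd then
          PySem.Int.mod (PySem.Int.mod (pvF rollMax (i.toNat - 1) jd + pvNew rollMax i.toNat jd) pvM
            - pvNew rollMax (i.toNat - pvRmN rollMax jd) jd) pvM
        else if l = jd then PySem.Int.mod (pvF rollMax (i.toNat - 1) jd + pvNew rollMax i.toNat jd) pvM
        else if l < jd then pvF rollMax i.toNat l else pvF rollMax (i.toNat - 1) l)
        = (fun l => if l < jd + 1 then pvF rollMax i.toNat l else pvF rollMax (i.toNat - 1) l) := by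
      funext l
      by_cases hlj : l = jd
      · subst hlj
        rw [if_pos rfl, if_pos (by omega), hFs, if_pos hbr, pvmod, pvmod]
      · rw [if_neg hlj, if_neg hlj]
        split_ifs <;> first | rfl | omega
    rw [hval]
    simp only [Prod.mk.injEq]
    refine ⟨trivial, ?_, ?_⟩
    · rw [pvBf]
    · have hg : ((List.range 6).map (fun l =>
            if l < jd + 1 then pvF rollMax i.toNat l else pvF rollMax (i.toNat - 1) l)).getD jd 0
          = pvF rollMax i.toNat jd := by
        rw [pvGetD_map_range, if_pos hjd, if_pos (by omega)]
      rw [hg, pvmod, Int.add_emod, Int.emod_emod_of_dvd _ dvd_rfl, ← Int.add_emod, ← pvSum_succ]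
  · rw [if_neg (by omega)]
    have hval2 : (fun l =>
          if l = jd then PySem.Int.mod (pvF rollMax (i.toNat - 1) jd + pvNew rollMax i.toNat jd) pvM
          else if l < jd then pvF rollMax i.toNat l else pvF rollMax (i.toNat - 1) l)
        = (fun l => if l < jd + 1 then pvF rollMax i.toNat l else pvF rollMax (i.toNat - 1) l) := by
      funext l
      by_cases hlj : l = jd
      · subst hlj
        rw [if_pos rfl, if_pos (by omega), hFs, if_neg hbr, pvmod]
      · rw [if_neg hlj]
        split_ifs <;> first | rfl | omega
    rw [hval2]
    simp only [Prod.mk.injEq]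
    refine ⟨trivial, ?_, ?_⟩
    · rw [pvBf]
    · have hg : ((List.range 6).map (fun l =>
            if l < jd + 1 then pvF rollMax i.toNat l else pvF rollMax (i.toNat - 1) l)).getD jd 0
          = pvF rollMax i.toNat jd := by
        rw [pvGetD_map_range, if_pos hjd, if_pos (by omega)]
      rw [hg, pvmod, Int.add_emod, Int.emod_emod_of_dvd _ dvd_rfl, ← Int.add_emod, ← pvSum_succ]


theorem pvBrow_eq (L : ℕ) (rollMax : List Int) (n i : Int)
    (hi : 2 ≤ i) (hin : i ≤ n) (hiL : i.toNat < L)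
    (hent : ∀ l < 6, 1 ≤ rollMax.getD l 0 ∧ rollMax.getD l 0 ≤ 15) :
    (List.range 6).foldl (pvBface rollMax n i (pvSum 6 (fun l => pvF rollMax (i.toNat - 1) l) % pvM))
      (pvBnw rollMax L i.toNat 0, pvBf rollMax i.toNat 0, (0:Int))
    = (pvBnw rollMax L i.toNat 6, pvBf rollMax i.toNat 6,
        pvSum 6 (fun l => pvF rollMax i.toNat l) % pvM) := by
  have h0 : (0:Int) = pvSum 0 (fun l => pvF rollMax i.toNat l) % pvM := by
    rw [pvSum_zero]
    simp
  rw [h0]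
  have h6 : List.range 6 = [0,1,2,3,4,5] := by decide
  rw [h6]
  simp only [List.foldl_cons, List.foldl_nil]
  rw [pvBface_eq L rollMax n i 0 hi hin hiL (by norm_num) hent,
      show (0+1 : ℕ) = 1 from rfl,
      pvBface_eq L rollMax n i 1 hi hin hiL (by norm_num) hent,
      show (1+1 : ℕ) = 2 from rfl,
      pvBface_eq L rollMax n i 2 hi hin hiL (by norm_num) hent,
      show (2+1 : ℕ) = 3 from rfl,
      pvBface_eq L rollMax n i 3 hi hin hiL (by norm_num) hent,
      show (3+1 : ℕ) = 4 from rfl,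
      pvBface_eq L rollMax n i 4 hi hin hiL (by norm_num) hent,
      show (4+1 : ℕ) = 5 from rfl,
      pvBface_eq L rollMax n i 5 hi hin hiL (by norm_num) hent,
      show (5+1 : ℕ) = 6 from rfl]

theorem pvBinit (L : ℕ) (rollMax : List Int) (hL : 2 ≤ L) :
    (List.range 6).foldl (fun nw j => nw.set j ((nw.getD j []).set 1 1))
        (List.replicate 6 (List.replicate L (0:Int)))
      = pvBnw rollMax L 1 6 := by
  have h6 : List.range 6 = [0,1,2,3,4,5] := by decide
  rw [h6]
  have hrep : List.replicate 6 (List.replicate L (0:Int))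
      = (List.range 6).map (fun _ => (List.range L).map (fun _ => (0:Int))) := by
    simp [List.map_const', List.length_range]
  rw [hrep]
  simp only [List.foldl_cons, List.foldl_nil]
  have hstep : ∀ (g : ℕ → List Int) (j : ℕ), j < 6 →
      (((List.range 6).map g).set j ((((List.range 6).map g).getD j []).set 1 1))
        = (List.range 6).map (fun l => if l = j then (g j).set 1 1 else g l) := by
    intro g j hj
    rw [pvGetD_map_range, if_pos hj, pvSet_map_range]
  rw [hstep _ 0 (by norm_num), hstep _ 1 (by norm_num), hstep _ 2 (by norm_num),
      hstep _ 3 (by norm_num), hstep _ 4 (by norm_num), hstep _ 5 (by norm_num)]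
  rw [pvBnw]
  apply List.map_congr_left
  intro l hl
  have hl6 := List.mem_range.mp hl
  interval_cases l <;>
  · norm_num
    rw [show (List.replicate L (0:Int)) = (List.range L).map (fun _ => (0:Int)) from by
      simp [List.map_const', List.length_range], pvSet_map_range]
    apply List.map_congr_left
    intro t ht
    have htL := List.mem_range.mp ht
    split_ifs <;>
      first | rfl | omega | (rw [show t = 1 from by omega]; rw [pvNew_one])

theorem pvBouter (L : ℕ) (rollMax : List Int) (n : Int) (hn : 2 ≤ n) (hL : L = (n+1).toNat)
    (hent : ∀ l < 6, 1 ≤ rollMax.getD l 0 ∧ rollMax.getD l 0 ≤ 15) :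
    ∀ (d : ℕ) (m : Int), 2 ≤ m → m + d = n + 1 →
    (PySem.List.pyRange m (n+1) 1).foldl
      (fun (st : List (List Int) × List Int × Int) i =>
        (List.range 6).foldl (pvBface rollMax n i st.2.2) (st.1, st.2.1, 0))
      (pvBnw rollMax L (m.toNat - 1) 6, pvBf rollMax (m.toNat - 1) 6,
        pvSum 6 (fun l => pvF rollMax (m.toNat - 1) l) % pvM)
    = (pvBnw rollMax L n.toNat 6, pvBf rollMax n.toNat 6,
        pvSum 6 (fun l => pvF rollMax n.toNat l) % pvM) := by
  intro d
  induction d with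
  | zero =>
    intro m hm hmn
    have hm' : m = n + 1 := by omega
    subst hm'
    rw [show PySem.List.pyRange (n+1) (n+1) 1 = [] from PySem.List.pyRange_one_eq_nil (by omega),
      List.foldl_nil, show (n+1).toNat - 1 = n.toNat from by omega]
  | succ d ih =>
    intro m hm hmn
    rw [show PySem.List.pyRange m (n+1) 1 = m :: PySem.List.pyRange (m+1) (n+1) 1 from
      PySem.List.pyRange_one_cons (by omega), List.foldl_cons]
    simp only []
    have h1 : pvBnw rollMax L (m.toNat - 1) 6 = pvBnw rollMax L m.toNat 0 := by
      rw [pvBnw, pvBnw]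
      apply List.map_congr_left
      intro l hl
      have hl6 := List.mem_range.mp hl
      apply List.map_congr_left
      intro t _
      split_ifs <;> first | rfl | omega
    have h2 : pvBf rollMax (m.toNat - 1) 6 = pvBf rollMax m.toNat 0 := by
      rw [pvBf, pvBf]
      apply List.map_congr_left
      intro l hl
      have hl6 := List.mem_range.mp hl
      split_ifs <;> first | rfl | omega
    rw [h1, h2, pvBrow_eq L rollMax n m hm (by omega) (by omega) hent]
    have hih := ih (m+1) (by omega) (by omega)
    rw [show (m+1).toNat - 1 = m.toNat from by omega] at hih
    exact hih

theorem pvB_eq (rollMax : List Int) (n : Int) (hn : 2 ≤ n)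
    (hent : ∀ l < 6, 1 ≤ rollMax.getD l 0 ∧ rollMax.getD l 0 ≤ 15) :
    dieSimulator_alt n rollMax = pvSum 6 (fun l => pvF rollMax n.toNat l) % pvM := by
  unfold dieSimulator_alt
  rw [if_neg (by omega), if_neg (by omega)]
  simp only []
  rw [pvBinit (n+1).toNat rollMax (by omega)]
  have hf0 : (List.replicate 6 (1:Int)) = pvBf rollMax 1 6 := by
    rw [pvBf]
    rw [show (List.replicate 6 (1:Int)) = (List.range 6).map (fun _ => (1:Int)) by
      simp [List.map_const', List.length_range]]
    apply List.map_congr_left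
    intro l hl
    rw [if_pos (List.mem_range.mp hl), pvF_one]
  rw [hf0]
  have hs : pvSum 6 (fun l => pvF rollMax 1 l) = 6 := by
    rw [pvSum_congr (fun k _ => pvF_one rollMax k), pvSum]
    decide
  have h6 : (6:Int) = pvSum 6 (fun l => pvF rollMax 1 l) % pvM := by
    rw [hs]
    decide
  rw [h6]
  have hout := pvBouter (n+1).toNat rollMax n hn rfl hent (n-1).toNat 2 (by omega) (by omega)
  rw [show ((2:Int)).toNat - 1 = 1 from rfl] at hout
  rw [hout]

-- ===== VERDICT (by name: the statement is the Claim_ definition above) =====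
set_option maxRecDepth 131072 in
set_option maxHeartbeats 4000000 in
theorem dieSimulator_spec : Claim_equal_dieSimulator := by
  intro n rollMax _ hpre
  unfold Spec_dieSimulator
  obtain ⟨hn0, hpre2⟩ := hpre
  by_cases h0 : n = 0
  · subst h0; rfl
  by_cases h1 : n = 1
  · subst h1; rfl
  have hn2 : 2 ≤ n := by omega
  obtain ⟨hlen, htake⟩ := hpre2 hn2
  have hent : ∀ l < 6, 1 ≤ rollMax.getD l 0 ∧ rollMax.getD l 0 ≤ 15 := by
    intro l hl
    have hlen' : l < rollMax.length := by omega
    have hmem : rollMax.getD l 0 ∈ rollMax.take 6 := by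
      rw [List.getD_eq_getElem rollMax 0 hlen']
      have hgt : (rollMax.take 6)[l]'(by simp [List.length_take]; omega) = rollMax[l] :=
        List.getElem_take
      rw [← hgt]
      exact List.getElem_mem _
    exact htake _ hmem
  have hrm1 : ∀ l < 6, 1 ≤ pvRmN rollMax l := by
    intro l hl; have := hent l hl; rw [pvRmN]; omega
  rw [pvA_eq rollMax n hn2 hent, pvB_eq rollMax n hn2 hent]
  rw [pvSum_congr (fun l hl => pvF_eq rollMax l (hrm1 l hl) n.toNat (by omega))]
  rw [pvSum_mod]
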